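-- pv_equiv track=rewrite | github.com/m1sterzer0/DaveProgrammingCompetitions | hackercup/python/2012/qual_C.py | solve
-- ===== SOURCE A (Python) =====
-- def tryit(fnt,W,H,words) :
--     numlines = 0
--     curline = W
--     for w in words :
--         curline += (1+len(w)) * fnt
--         if curline > W :
--             numlines += 1; curline = len(w) * fnt
--     return fnt*numlines <= H
--
-- def solve(W,H,S) :
--     words = S.split()
--     longest = 0
--     for w in words : longest = max(longest,len(w))
--     maxfontsize = W // longest
--     l,u = 0,maxfontsize+1
--     while (u-l > 1) :
--         m = (u+l)>>1
--         (l,u) = (m,u) if tryit(m,W,H,words) else (l,m)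
--     return l
-- ===== SOURCE B (Python) =====
-- def line_count(cap, widths):
--     # greedy word wrap with unit-scale widths into a line of capacity cap
--     lines = 1
--     cur = widths[0]
--     for wl in widths[1:]:
--         cur += 1 + wl
--         if cur > cap:
--             lines += 1
--             cur = wl
--     return lines
--
-- def solve(W, H, S):
--     widths = [len(w) for w in S.split()]
--     maxfont = W // max(widths)
--     # the packing scales: font m wraps into line_count(W // m) lines, and W // m
--     # takes O(sqrt(W)) distinct values; on a block of fonts sharing q = W // m the
--     # line count is constant, so the largest fitting font there is min(block end, H // lines)
--     best = 0
--     m = 1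
--     while m <= maxfont:
--         q = W // m
--         end = min(maxfont, W // q)
--         c = min(end, H // line_count(q, widths))
--         if c >= m:
--             best = c
--         m = end + 1
--     return best
-- ===== Notes on version B (the rewrite author's own statement) =====
-- stated objective: alternative
-- what changed: Replaced the binary search over font sizes by divisor-block enumeration: the greedy wrap scales, so font m needs line_count(W // m) lines with a unit-width helper, W // m takes O(sqrt(W)) distinct values, and within each block of fonts sharing q = W // m the line count is constant, so the largest fitting font of the block is min(block end, H // line_count) in closed form; the answer is the best block candidate (no feasibility search at all).
import Mathlib
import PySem

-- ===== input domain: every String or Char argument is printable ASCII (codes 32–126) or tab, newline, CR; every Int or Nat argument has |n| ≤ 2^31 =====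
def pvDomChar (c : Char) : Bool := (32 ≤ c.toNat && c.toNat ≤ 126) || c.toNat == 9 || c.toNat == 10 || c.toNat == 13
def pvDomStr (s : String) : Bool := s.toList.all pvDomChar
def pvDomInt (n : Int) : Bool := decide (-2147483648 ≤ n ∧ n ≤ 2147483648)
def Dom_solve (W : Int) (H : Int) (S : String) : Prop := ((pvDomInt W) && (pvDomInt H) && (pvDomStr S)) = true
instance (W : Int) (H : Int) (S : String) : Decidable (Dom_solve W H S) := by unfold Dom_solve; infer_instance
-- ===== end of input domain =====

-- B replaces A's binary search by divisor-block enumeration: the wrap scales (font m needs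
-- line_count(W//m) lines), W//m takes few distinct values, and per block the largest fitting
-- font is a closed form; same answers, no search (alternative).


-- ===== PORT A =====
def pvTryitStep (fnt : Int) (W : Int) (p : Int × Int) (w : String) : Int × Int :=
  let c := p.2 + (1 + PySem.Str.len w) * fnt
  if c > W then (p.1 + 1, PySem.Str.len w * fnt) else (p.1, c)

def tryit (fnt : Int) (W : Int) (H : Int) (words : List String) : Bool :=
  let st := words.foldl (pvTryitStep fnt W) (0, W)
  decide (fnt * st.1 ≤ H)

-- A's while-loop: while u-l>1: m=(u+l)>>1; (l,u)=(m,u) if tryit(m,..) else (l,m)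
def pvBsLoop (W : Int) (H : Int) (words : List String) (l : Int) (u : Int) : Int :=
  if _h : u - l > 1 then
    let m := (u + l) >>> (1 : Nat)
    if tryit m W H words then pvBsLoop W H words m u else pvBsLoop W H words l m
  else l
termination_by (u - l).toNat
decreasing_by
  · simp only [Int.shiftRight_eq_div_pow] at *; omega
  · simp only [Int.shiftRight_eq_div_pow] at *; omega

def solve (W : Int) (H : Int) (S : String) : Int :=
  let words := PySem.Str.split₀ S
  let longest := words.foldl (fun acc w => max acc (PySem.Str.len w)) 0
  let maxfontsize := PySem.Int.floordiv W longest
  pvBsLoop W H words 0 (maxfontsize + 1)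

-- ===== PORT B =====
-- line_count's for-loop over widths[1:] (unit-scale greedy wrap into capacity cap)
def pvUnitStep (cap : Int) (p : Int × Int) (wl : Int) : Int × Int :=
  let c := p.2 + 1 + wl
  if c > cap then (p.1 + 1, wl) else (p.1, c)

-- line_count(cap, widths): lines = 1, cur = widths[0], then the loop.
-- (Source B indexes widths[0], so it is only ever called with nonempty widths; [] is unreachable)
def pvLineCount (cap : Int) (widths : List Int) : Int :=
  match widths with
  | [] => 1
  | w0 :: rest => (rest.foldl (pvUnitStep cap) (1, w0)).1

-- Source B's while-loop over divisor blocks; fuel only makes the recursion total (inside the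
-- domain the block end never falls below m, so maxfont.toNat + 1 steps always suffice)
def pvBlocks (W : Int) (H : Int) (maxfont : Int) (widths : List Int) :
    Nat → Int → Int → Int
  | 0, _, best => best
  | fuel + 1, m, best =>
    if m ≤ maxfont then
      let q := PySem.Int.floordiv W m
      let e := min maxfont (PySem.Int.floordiv W q)
      let c := min e (PySem.Int.floordiv H (pvLineCount q widths))
      pvBlocks W H maxfont widths fuel (e + 1) (if m ≤ c then c else best)
    else best

def solve_alt (W : Int) (H : Int) (S : String) : Int :=
  let widths := (PySem.Str.split₀ S).map (fun w => PySem.Str.len w)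
  match PySem.List.max? widths (fun x => x) with
  | none => 0   -- max([]) raises in Python: unreachable under Pre_solve
  | some mx =>
    let maxfont := PySem.Int.floordiv W mx
    pvBlocks W H maxfont widths (maxfont.toNat + 1) 1 0

-- ===== PRECONDITION & SPEC =====
-- Pre_ excludes exactly the inputs where S contains no word: there both Pythons raise
-- (A: ZeroDivisionError on W // 0; B: ValueError on max([])).
def Pre_solve (_W : Int) (_H : Int) (S : String) : Prop := PySem.Str.split₀ S ≠ []
instance (W : Int) (H : Int) (S : String) : Decidable (Pre_solve W H S) := by unfold Pre_solve; infer_instance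

def pvWitness_solve : Int × Int × String := (10, 10, "hello world")

def Spec_solve (W : Int) (H : Int) (S : String) (out : Int) : Prop := out = solve_alt W H S
instance (W : Int) (H : Int) (S : String) (out : Int) : Decidable (Spec_solve W H S out) := by unfold Spec_solve; infer_instance

-- ===== CLAIM (what is proved, stated in full; the proofs are below) =====
def Claim_equal_solve : Prop := ∀ (W : Int) (H : Int) (S : String), Dom_solve W H S → Pre_solve W H S → Spec_solve W H S (solve W H S)

-- ===== LEMMAS AND PROOFS =====

lemma pv_go_ne_nil' : ∀ (s : List Char) (cur : List Char) (acc : List (List Char)),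
    (∀ w ∈ acc, w ≠ []) → (∀ w ∈ PySem.Chars.split₀.go s cur acc, w ≠ []) := by
  intro s
  induction s with
  | nil =>
    intro cur acc hacc w hw
    unfold PySem.Chars.split₀.go at hw
    split at hw
    · exact hacc w (List.mem_reverse.mp hw)
    · rename_i h'
      rcases List.mem_cons.mp (List.mem_reverse.mp hw) with h | h
      · subst h
        intro he
        apply h'
        simp only [List.isEmpty_iff]
        simpa using he
      · exact hacc w h
  | cons c rest ih =>
    intro cur acc hacc w hw
    unfold PySem.Chars.split₀.go at hw
    split at hw
    · split at hw
      · exact ih [] acc hacc w hw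
      · rename_i h'
        refine ih [] _ ?_ w hw
        intro v hv
        rcases List.mem_cons.mp hv with h | h
        · subst h
          intro he
          apply h'
          simp only [List.isEmpty_iff]
          simpa using he
        · exact hacc v h
    · exact ih (c :: cur) acc hacc w hw

lemma pv_words_len_pos (S : String) : ∀ w ∈ PySem.Str.split₀ S, 1 ≤ PySem.Str.len w := by
  intro w hw
  simp only [PySem.Str.split₀, List.mem_map] at hw
  obtain ⟨l, hl, rfl⟩ := hw
  have h := pv_go_ne_nil' S.toList [] [] (by simp) l hl
  simp only [PySem.Str.len]
  cases l with
  | nil => exact absurd rfl h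
  | cons a t => simp

lemma pv_longest_ge (words : List String) :
    ∀ (init : Int), init ≤ words.foldl (fun acc w => max acc (PySem.Str.len w)) init ∧
      ∀ w ∈ words, PySem.Str.len w ≤ words.foldl (fun acc w => max acc (PySem.Str.len w)) init := by
  induction words with
  | nil => simp
  | cons a t ih =>
    intro init
    constructor
    · exact le_trans (le_max_left _ _) (ih (max init (PySem.Str.len a))).1
    · intro w hw
      rcases List.mem_cons.mp hw with h | h
      · subst h
        exact le_trans (le_max_right _ _) (ih _).1
      · exact (ih _).2 w h

lemma pv_agree (top : Int) (P : Int → Bool)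
    (mono : ∀ a b, 1 ≤ a → a ≤ b → b ≤ top → P b = true → P a = true)
    (r s : Int) (hr0 : 0 ≤ r) (hrt : r ≤ top) (hrP : r = 0 ∨ P r = true)
    (hrN : r = top ∨ P (r + 1) = false)
    (hs : (s = 0 ∧ ∀ k, 1 ≤ k → k ≤ top → P k = false) ∨
      (1 ≤ s ∧ s ≤ top ∧ P s = true ∧ ∀ k, s < k → k ≤ top → P k = false)) : r = s := by
  rcases hs with ⟨rfl, hall⟩ | ⟨h1, h2, hPs, hafter⟩
  · by_contra hne
    have hr1 : 1 ≤ r := by omega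
    have := hall r hr1 hrt
    rcases hrP with h | h
    · omega
    · rw [h] at this; exact absurd this (by simp)
  · by_contra hne
    rcases lt_or_gt_of_ne hne with hlt | hgt
    · have hrtop : r ≠ top := by omega
      have hfalse : P (r + 1) = false := hrN.resolve_left hrtop
      have htrue : P (r + 1) = true := mono (r + 1) s (by omega) (by omega) h2 hPs
      rw [htrue] at hfalse; exact absurd hfalse (by simp)
    · have htrue : P r = true := hrP.resolve_left (by omega)
      have := hafter r hgt hrt
      rw [htrue] at this; exact absurd this (by simp)

-- characterisation of A's binary search
lemma pv_bs_char (W H : Int) (words : List String) (top : Int) :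
    ∀ (n : Nat) (l u : Int), (u - l).toNat ≤ n → 0 ≤ l → l < u → u ≤ top + 1 →
    (l = 0 ∨ tryit l W H words = true) → (u = top + 1 ∨ tryit u W H words = false) →
    0 ≤ pvBsLoop W H words l u ∧ pvBsLoop W H words l u ≤ top ∧
    (pvBsLoop W H words l u = 0 ∨ tryit (pvBsLoop W H words l u) W H words = true) ∧
    (pvBsLoop W H words l u = top ∨ tryit (pvBsLoop W H words l u + 1) W H words = false) := by
  intro n
  induction n with
  | zero =>
    intro l u hn h0 hlu hu hl hutop
    omega
  | succ n ih =>
    intro l u hn h0 hlu hu hPl hPu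
    by_cases hgap : u - l > 1
    · rw [pvBsLoop, dif_pos hgap]
      have hm : (u + l) >>> (1:Nat) = (u + l) / 2 := by
        simp [Int.shiftRight_eq_div_pow]
      by_cases ht : tryit ((u + l) >>> (1:Nat)) W H words = true
      · rw [if_pos ht]
        exact ih _ u (by omega) (by omega) (by omega) hu (Or.inr ht) hPu
      · rw [if_neg ht]
        exact ih l _ (by omega) h0 (by omega) (by omega) hPl (Or.inr (by simpa using ht))
    · rw [pvBsLoop, dif_neg hgap]
      have huL : u = l + 1 := by omega
      refine ⟨h0, by omega, hPl.imp_left id, ?_⟩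
      rcases hPu with h | h
      · left; omega
      · right; rw [← huL]; exact h

lemma pv_fold_inv (a b W longest : Int) (ha : 1 ≤ a) (hab : a ≤ b) (hbW : b * longest ≤ W) :
    ∀ (words : List String), (∀ w ∈ words, 1 ≤ PySem.Str.len w ∧ PySem.Str.len w ≤ longest) →
    ∀ (na ca nb cb : Int), 0 ≤ na → na ≤ nb → (na = nb → ca ≤ cb) →
      0 ≤ ca → ca ≤ W → 0 ≤ cb → cb ≤ W →
      0 ≤ (words.foldl (pvTryitStep a W) (na, ca)).1 ∧
      (words.foldl (pvTryitStep a W) (na, ca)).1 ≤ (words.foldl (pvTryitStep b W) (nb, cb)).1 := by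
  intro words
  induction words with
  | nil => intro _ na ca nb cb h1 h2 _ _ _ _ _; exact ⟨h1, h2⟩
  | cons w t ih =>
    intro hw na ca nb cb hna hnab hcc hca0 hcaW hcb0 hcbW
    obtain ⟨hL1, hL2⟩ := hw w (List.mem_cons_self)
    have hlong1 : 1 ≤ longest := le_trans hL1 hL2
    have haL : PySem.Str.len w * a ≤ W := by nlinarith
    have hbL : PySem.Str.len w * b ≤ W := by nlinarith
    simp only [List.foldl_cons]
    rw [pvTryitStep, pvTryitStep]
    simp only []
    by_cases hba : ca + (1 + PySem.Str.len w) * a > W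
    · rw [if_pos hba]
      by_cases hbb : cb + (1 + PySem.Str.len w) * b > W
      · rw [if_pos hbb]
        refine ih (fun v hv => hw v (List.mem_cons_of_mem _ hv)) _ _ _ _ (by omega) (by omega)
          (fun _ => by nlinarith) (by nlinarith) haL (by nlinarith) hbL
      · rw [if_neg hbb]
        have hnanb : na < nb := by
          rcases (by omega : na < nb ∨ na = nb) with h | h
          · exact h
          · exfalso; have := hcc h; nlinarith
        refine ih (fun v hv => hw v (List.mem_cons_of_mem _ hv)) _ _ _ _ (by omega) (by omega)
          (fun he => by nlinarith) (by nlinarith) haL (by nlinarith) (by omega)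
    · rw [if_neg hba]
      by_cases hbb : cb + (1 + PySem.Str.len w) * b > W
      · rw [if_pos hbb]
        refine ih (fun v hv => hw v (List.mem_cons_of_mem _ hv)) _ _ _ _ hna (by omega)
          (fun he => by omega) (by nlinarith) (by omega) (by nlinarith) hbL
      · rw [if_neg hbb]
        refine ih (fun v hv => hw v (List.mem_cons_of_mem _ hv)) _ _ _ _ hna hnab
          (fun he => by have := hcc he; nlinarith) (by nlinarith) (by omega) (by nlinarith) (by omega)

lemma pv_tryit_mono (W H a b longest : Int) (words : List String)
    (ha : 1 ≤ a) (hab : a ≤ b) (hbW : b * longest ≤ W)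
    (hw : ∀ w ∈ words, 1 ≤ PySem.Str.len w ∧ PySem.Str.len w ≤ longest)
    (h : tryit b W H words = true) : tryit a W H words = true := by
  cases words with
  | nil => simpa [tryit] using h
  | cons w t =>
    obtain ⟨hL1, hL2⟩ := hw w (List.mem_cons_self)
    have hlong1 : 1 ≤ longest := le_trans hL1 hL2
    have hW0 : 0 ≤ W := by nlinarith
    unfold tryit at *
    simp only [decide_eq_true_eq] at *
    have hinv := pv_fold_inv a b W longest ha hab hbW (w :: t) hw 0 W 0 W le_rfl le_rfl
      (fun _ => le_rfl) hW0 le_rfl hW0 le_rfl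
    nlinarith [hinv.1, hinv.2]

-- pvLineCount's running line count never drops below its start
lemma pv_unit_fst_ge (cap : Int) : ∀ (t : List Int) (n c : Int),
    n ≤ (t.foldl (pvUnitStep cap) (n, c)).1 := by
  intro t
  induction t with
  | nil => intro n c; exact le_rfl
  | cons v r ih =>
    intro n c
    simp only [List.foldl_cons]
    rw [pvUnitStep]
    simp only []
    by_cases hb : c + 1 + v > cap
    · rw [if_pos hb]; exact le_trans (by omega) (ih (n + 1) v)
    · rw [if_neg hb]; exact ih n (c + 1 + v)

lemma pv_linecount_pos (cap : Int) (widths : List Int) : 1 ≤ pvLineCount cap widths := by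
  cases widths with
  | nil => simp [pvLineCount]
  | cons w0 rest => exact pv_unit_fst_ge cap rest 1 w0

-- the wrap scales: A's fold at font m is the unit fold at capacity W // m with the width scaled
lemma pv_scale_fold (W m : Int) (hm : 0 < m) : ∀ (t : List String) (n c : Int),
    t.foldl (pvTryitStep m W) (n, m * c) =
      (((t.map (fun v => PySem.Str.len v)).foldl (pvUnitStep (PySem.Int.floordiv W m)) (n, c)).1,
       m * ((t.map (fun v => PySem.Str.len v)).foldl (pvUnitStep (PySem.Int.floordiv W m)) (n, c)).2) := by
  intro t
  induction t with
  | nil => intro n c; rfl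
  | cons v r ih =>
    intro n c
    simp only [List.foldl_cons, List.map_cons]
    rw [pvTryitStep, pvUnitStep]
    simp only []
    have hbr : (m * c + (1 + PySem.Str.len v) * m > W) ↔ (c + 1 + PySem.Str.len v > PySem.Int.floordiv W m) := by
      have hb2 := PySem.Int.floordiv_lt_iff_lt_mul (a := W) (b := m) (q := c + 1 + PySem.Str.len v) hm
      constructor
      · intro h; exact hb2.mpr (by nlinarith)
      · intro h; have := hb2.mp h; nlinarith
    by_cases hb : m * c + (1 + PySem.Str.len v) * m > W
    · rw [if_pos hb, if_pos (hbr.mp hb)]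
      have : PySem.Str.len v * m = m * PySem.Str.len v := by ring
      rw [this]
      exact ih (n + 1) (PySem.Str.len v)
    · rw [if_neg hb, if_neg (fun h => hb (hbr.mpr h))]
      have : m * c + (1 + PySem.Str.len v) * m = m * (c + 1 + PySem.Str.len v) := by ring
      rw [this]
      exact ih n (c + 1 + PySem.Str.len v)

-- the two feasibility tests coincide for fonts ≥ 1 on a nonempty word list
lemma pv_feas_eq (W H m : Int) (hm : 1 ≤ m) (w : String) (t : List String) :
    tryit m W H (w :: t) =
      decide (m * pvLineCount (PySem.Int.floordiv W m) ((w :: t).map (fun v => PySem.Str.len v)) ≤ H) := by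
  unfold tryit pvLineCount
  simp only [List.map_cons, List.foldl_cons]
  have hfirst : pvTryitStep m W (0, W) w = (1, m * PySem.Str.len w) := by
    rw [pvTryitStep]
    have hlen : 0 ≤ PySem.Str.len w := by
      simp only [PySem.Str.len]; positivity
    have : W + (1 + PySem.Str.len w) * m > W := by nlinarith
    simp only [this, if_pos]
    norm_num
    ring
  have hsame : t.foldl (pvTryitStep m W) (pvTryitStep m W (0, W) w) =
      (((t.map (fun v => PySem.Str.len v)).foldl (pvUnitStep (PySem.Int.floordiv W m)) (1, PySem.Str.len w)).1,
       m * ((t.map (fun v => PySem.Str.len v)).foldl (pvUnitStep (PySem.Int.floordiv W m)) (1, PySem.Str.len w)).2) := by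
    rw [hfirst]
    exact pv_scale_fold W m (by omega) t 1 (PySem.Str.len w)
  simp only [hsame]
  rfl

-- blocks of a fixed quotient: every k between m and W // (W // m) shares W // k = W // m
lemma pv_block_const (W m k : Int) (h1 : 1 ≤ m) (hmW : m ≤ W) (hmk : m ≤ k)
    (hk : k ≤ PySem.Int.floordiv W (PySem.Int.floordiv W m)) :
    PySem.Int.floordiv W k = PySem.Int.floordiv W m := by
  have hq1 : 1 ≤ PySem.Int.floordiv W m :=
    (PySem.Int.le_floordiv_iff_mul_le (by omega)).mpr (by omega)
  have hk0 : (0:Int) < k := by omega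
  have hkq : k * PySem.Int.floordiv W m ≤ W :=
    (PySem.Int.le_floordiv_iff_mul_le (by omega : (0:Int) < PySem.Int.floordiv W m)).mp hk
  have hge : PySem.Int.floordiv W m ≤ PySem.Int.floordiv W k :=
    (PySem.Int.le_floordiv_iff_mul_le hk0).mpr (by linarith [hkq, mul_comm k (PySem.Int.floordiv W m)])
  have hle : PySem.Int.floordiv W k ≤ PySem.Int.floordiv W m := by
    by_contra hlt
    have h2 : PySem.Int.floordiv W m + 1 ≤ PySem.Int.floordiv W k := by omega
    have h3 : (PySem.Int.floordiv W m + 1) * k ≤ W :=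
      (PySem.Int.le_floordiv_iff_mul_le hk0).mp h2
    have h4 : W < (PySem.Int.floordiv W m + 1) * m :=
      (PySem.Int.floordiv_lt_iff_lt_mul (by omega : (0:Int) < m)).mp (by omega)
    nlinarith [h3, h4]
  omega

-- characterisation of B's block scan
lemma pv_blocks_char (W H maxfont : Int) (widths : List Int) (hWmf : maxfont ≤ W) :
    ∀ (fuel : Nat) (m best : Int), 1 ≤ m → (maxfont - m + 1).toNat ≤ fuel →
    0 ≤ best → best < m → m ≤ maxfont + 1 →
    (best = 0 ∨ decide (best * pvLineCount (PySem.Int.floordiv W best) widths ≤ H) = true) →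
    (∀ k, best < k → k < m → decide (k * pvLineCount (PySem.Int.floordiv W k) widths ≤ H) = false) →
    0 ≤ pvBlocks W H maxfont widths fuel m best ∧
    pvBlocks W H maxfont widths fuel m best ≤ maxfont ∧
    (pvBlocks W H maxfont widths fuel m best = 0 ∨
      decide (pvBlocks W H maxfont widths fuel m best *
        pvLineCount (PySem.Int.floordiv W (pvBlocks W H maxfont widths fuel m best)) widths ≤ H) = true) ∧
    (∀ k, pvBlocks W H maxfont widths fuel m best < k → k ≤ maxfont →
      decide (k * pvLineCount (PySem.Int.floordiv W k) widths ≤ H) = false) := by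
  intro fuel
  induction fuel with
  | zero =>
    intro m best h1 hfu hb0 hbm hm1 hP hafter
    have : m = maxfont + 1 := by omega
    subst this
    simp only [pvBlocks]
    exact ⟨hb0, by omega, hP, fun k hk1 hk2 => hafter k hk1 (by omega)⟩
  | succ fuel ih =>
    intro m best h1 hfu hb0 hbm hm1 hP hafter
    by_cases hmt : m ≤ maxfont
    · have hstep : pvBlocks W H maxfont widths (fuel + 1) m best =
          pvBlocks W H maxfont widths fuel
            (min maxfont (PySem.Int.floordiv W (PySem.Int.floordiv W m)) + 1)
            (if m ≤ min (min maxfont (PySem.Int.floordiv W (PySem.Int.floordiv W m)))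
                (PySem.Int.floordiv H (pvLineCount (PySem.Int.floordiv W m) widths))
             then min (min maxfont (PySem.Int.floordiv W (PySem.Int.floordiv W m)))
                (PySem.Int.floordiv H (pvLineCount (PySem.Int.floordiv W m) widths))
             else best) := by
        rw [pvBlocks]
        simp only [if_pos hmt]
      rw [hstep]
      set q := PySem.Int.floordiv W m with hqdef
      set e := min maxfont (PySem.Int.floordiv W q) with hedef
      set L := pvLineCount q widths with hLdef
      set c := min e (PySem.Int.floordiv H L) with hcdef
      have heWq : PySem.Int.floordiv W q = PySem.Int.floordiv W (PySem.Int.floordiv W m) := by rw [hqdef]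
      have heq2 : e ≤ PySem.Int.floordiv W q := min_le_right _ _
      have hmW : m ≤ W := by omega
      have hq1 : 1 ≤ q := (PySem.Int.le_floordiv_iff_mul_le (by omega)).mpr (by omega)
      have hqm : q * m ≤ W := by
        have := (PySem.Int.le_floordiv_iff_mul_le (by omega : (0:Int) < m)).mp (le_rfl : q ≤ PySem.Int.floordiv W m)
        linarith
      have hemax : e ≤ maxfont := min_le_left _ _
      have hme : m ≤ e := by
        have : m ≤ PySem.Int.floordiv W q :=
          (PySem.Int.le_floordiv_iff_mul_le (by omega)).mpr (by nlinarith)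
        omega
      have hL1 : 1 ≤ L := pv_linecount_pos q widths
      have hblock : ∀ k, m ≤ k → k ≤ e → PySem.Int.floordiv W k = q := by
        intro k hk1 hk2
        exact pv_block_const W m k h1 hmW hk1 (by rw [← heWq]; omega)
      have hfeas : ∀ k, m ≤ k → k ≤ e →
          decide (k * pvLineCount (PySem.Int.floordiv W k) widths ≤ H) = decide (k ≤ PySem.Int.floordiv H L) := by
        intro k hk1 hk2
        rw [hblock k hk1 hk2, ← hLdef]
        have := PySem.Int.le_floordiv_iff_mul_le (a := H) (b := L) (by omega : (0:Int) < L) (q := k)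
        by_cases hx : k * L ≤ H
        · rw [decide_eq_true hx, decide_eq_true (this.mpr hx)]
        · rw [decide_eq_false hx, decide_eq_false (fun h => hx (this.mp h))]
      by_cases hc : m ≤ c
      · rw [if_pos hc]
        refine ih (e + 1) c (by omega) (by omega) (by omega) (by omega) (by omega) ?_ ?_
        · right
          rw [hfeas c (by omega) (by omega)]
          simp only [decide_eq_true_eq]
          omega
        · intro k hk1 hk2
          rw [hfeas k (by omega) (by omega)]
          simp only [decide_eq_false_iff_not]
          omega
      · rw [if_neg hc]
        refine ih (e + 1) best (by omega) (by omega) hb0 (by omega) (by omega) hP ?_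
        intro k hk1 hk2
        by_cases hkm : k < m
        · exact hafter k hk1 hkm
        · rw [hfeas k (by omega) (by omega)]
          simp only [decide_eq_false_iff_not]
          omega
    · rw [pvBlocks, if_neg hmt]
      exact ⟨hb0, by omega, hP, fun k hk1 hk2 => hafter k hk1 (by omega)⟩

-- main bridge: on any nonempty word list of positive lengths the two loops agree
lemma pv_main (W H : Int) (words : List String)
    (hlens : ∀ w ∈ words, 1 ≤ PySem.Str.len w) (hpre : words ≠ []) :
    pvBsLoop W H words 0
        (PySem.Int.floordiv W (words.foldl (fun acc w => max acc (PySem.Str.len w)) 0) + 1) =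
      (match PySem.List.max? (words.map (fun w => PySem.Str.len w)) (fun x => x) with
        | none => 0
        | some mx =>
          pvBlocks W H (PySem.Int.floordiv W mx) (words.map (fun w => PySem.Str.len w))
            ((PySem.Int.floordiv W mx).toNat + 1) 1 0) := by
  cases words with
  | nil => exact absurd rfl hpre
  | cons w t =>
    have hw1 : 1 ≤ PySem.Str.len w := hlens w (List.mem_cons_self)
    -- the two "longest" computations agree
    have hmax : PySem.List.max? ((w :: t).map (fun v => PySem.Str.len v)) (fun x => x) =
        some ((w :: t).foldl (fun acc v => max acc (PySem.Str.len v)) 0) := by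
      rw [List.map_cons, PySem.List.max?_id_cons]
      congr 1
      rw [List.foldl_map]
      simp only [List.foldl_cons]
      rw [max_eq_right (by omega : (0:Int) ≤ PySem.Str.len w)]
    rw [hmax]
    have hred : (match some ((w :: t).foldl (fun acc v => max acc (PySem.Str.len v)) 0) with
        | none => 0
        | some mx =>
          pvBlocks W H (PySem.Int.floordiv W mx) ((w :: t).map (fun v => PySem.Str.len v))
            ((PySem.Int.floordiv W mx).toNat + 1) 1 0)
        = pvBlocks W H
            (PySem.Int.floordiv W ((w :: t).foldl (fun acc v => max acc (PySem.Str.len v)) 0))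
            ((w :: t).map (fun v => PySem.Str.len v))
            ((PySem.Int.floordiv W ((w :: t).foldl (fun acc v => max acc (PySem.Str.len v)) 0)).toNat + 1)
            1 0 := rfl
    rw [hred]
    set longest := (w :: t).foldl (fun acc v => max acc (PySem.Str.len v)) 0 with hldef
    set top := PySem.Int.floordiv W longest with htdef
    set widths := (w :: t).map (fun v => PySem.Str.len v) with hwdef
    have hle : ∀ v ∈ (w :: t), PySem.Str.len v ≤ longest := (pv_longest_ge (w :: t) 0).2
    have hlong1 : 1 ≤ longest := le_trans hw1 (hle w (List.mem_cons_self))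
    by_cases htop : 1 ≤ top
    · have htopW : top * longest ≤ W :=
        (PySem.Int.le_floordiv_iff_mul_le (by omega)).mp le_rfl
      have htW : top ≤ W := by nlinarith
      have mono : ∀ a b, 1 ≤ a → a ≤ b → b ≤ top →
          tryit b W H (w :: t) = true → tryit a W H (w :: t) = true := by
        intro a b h1 h2 h3 h
        exact pv_tryit_mono W H a b longest (w :: t) h1 h2 (by nlinarith)
          (fun v hv => ⟨hlens v hv, hle v hv⟩) h
      have hb := pv_bs_char W H (w :: t) top (top + 1 - 0).toNat 0 (top + 1) le_rfl le_rfl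
        (by omega) le_rfl (Or.inl rfl) (Or.inl rfl)
      obtain ⟨hs0, hst, hsP, hsafter⟩ :=
        pv_blocks_char W H top widths htW (top.toNat + 1) 1 0 le_rfl (by omega) le_rfl
          (by omega) (by omega) (Or.inl rfl) (fun k hk1 hk2 => by omega)
      have hfeq : ∀ k, 1 ≤ k → tryit k W H (w :: t) =
          decide (k * pvLineCount (PySem.Int.floordiv W k) widths ≤ H) :=
        fun k hk => pv_feas_eq W H k hk w t
      refine pv_agree top (fun k => tryit k W H (w :: t)) mono _ _ hb.1 hb.2.1 hb.2.2.1 hb.2.2.2 ?_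
      set r := pvBlocks W H top widths (top.toNat + 1) 1 0 with hrdef
      by_cases hz : r = 0
      · refine Or.inl ⟨hz, fun k hk1 hk2 => ?_⟩
        show tryit k W H (w :: t) = false
        rw [hfeq k hk1]
        exact hsafter k (by omega) hk2
      · refine Or.inr ⟨by omega, hst, ?_, fun k hk1 hk2 => ?_⟩
        · show tryit r W H (w :: t) = true
          rw [hfeq _ (by omega)]
          exact hsP.resolve_left hz
        · show tryit k W H (w :: t) = false
          rw [hfeq k (by omega)]
          exact hsafter k hk1 hk2
    · rw [pvBsLoop, dif_neg (by omega)]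
      have h1 : (top.toNat + 1 : Nat) = Nat.succ top.toNat := rfl
      rw [pvBlocks, if_neg (by omega)]

-- ===== VERDICT (by name: the statement is the Claim_ definition above) =====
theorem solve_spec : Claim_equal_solve := by
  intro W H S _hdom hpre
  show solve W H S = solve_alt W H S
  unfold solve solve_alt
  exact pv_main W H (PySem.Str.split₀ S) (pv_words_len_pos S) hpre
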